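-- pv_equiv track=rewrite | github.com/djpohly/pyparsing | pyparsing/util.py | _collapse_string_to_ranges
-- ===== SOURCE A (Python) =====
-- import collections
-- import itertools
-- from typing import List, Union, Iterable, Callable, TypeVar, cast
--
-- def _collapse_string_to_ranges(
--     s: Union[str, Iterable[str]], re_escape: bool = True
-- ) -> str:
--     def is_consecutive(c):
--         c_int = ord(c)
--         is_consecutive.prev, prev = c_int, is_consecutive.prev
--         if c_int - prev > 1:
--             is_consecutive.value = next(is_consecutive.counter)
--         return is_consecutive.value
--
--     is_consecutive.prev = 0  # type: ignore [attr-defined]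
--     is_consecutive.counter = itertools.count()  # type: ignore [attr-defined]
--     is_consecutive.value = -1  # type: ignore [attr-defined]
--
--     def escape_re_range_char(c):
--         return "\\" + c if c in r"\^-][" else c
--
--     def no_escape_re_range_char(c):
--         return c
--
--     if not re_escape:
--         escape_re_range_char = no_escape_re_range_char
--
--     ret = []
--     s = "".join(sorted(set(s)))
--     if len(s) > 3:
--         for _, chars in itertools.groupby(s, key=is_consecutive):
--             first = last = next(chars)
--             last = collections.deque(
--                 itertools.chain(iter([last]), chars), maxlen=1
--             ).pop()
--             if first == last:
--                 ret.append(escape_re_range_char(first))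
--             else:
--                 sep = "" if ord(last) == ord(first) + 1 else "-"
--                 ret.append(
--                     f"{escape_re_range_char(first)}{sep}{escape_re_range_char(last)}"
--                 )
--     else:
--         ret = [escape_re_range_char(c) for c in s]
--
--     return "".join(ret)
-- ===== SOURCE B (Python) =====
-- def _collapse_string_to_ranges(s, re_escape=True):
--     def esc(c):
--         return "\\" + c if re_escape and c in r"\^-][" else c
--
--     uniq = set(s)
--     if len(uniq) <= 3:
--         return "".join(esc(c) for c in sorted(uniq))
--     # A character begins a range iff its predecessor codepoint is absent,
--     # and ends one iff its successor codepoint is absent; sorting each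
--     # boundary set pairs the k-th start with the k-th end.
--     starts = sorted(c for c in uniq if chr(ord(c) - 1) not in uniq)
--     ends = sorted(c for c in uniq if chr(ord(c) + 1) not in uniq)
--     out = []
--     for a, b in zip(starts, ends):
--         if a == b:
--             out.append(esc(a))
--         else:
--             out.append(esc(a) + ("" if ord(b) == ord(a) + 1 else "-") + esc(b))
--     return "".join(out)
-- ===== Notes on version B (the rewrite author's own statement) =====
-- stated objective: alternative
-- what changed: Instead of a sequential pass grouping consecutive characters (A's groupby with a stateful key/count/deque), B detects range boundaries by set membership: a char starts a range iff its predecessor codepoint is absent from the set and ends one iff its successor is absent; sorting the two boundary sets and zipping them yields the ranges.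
import Mathlib
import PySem

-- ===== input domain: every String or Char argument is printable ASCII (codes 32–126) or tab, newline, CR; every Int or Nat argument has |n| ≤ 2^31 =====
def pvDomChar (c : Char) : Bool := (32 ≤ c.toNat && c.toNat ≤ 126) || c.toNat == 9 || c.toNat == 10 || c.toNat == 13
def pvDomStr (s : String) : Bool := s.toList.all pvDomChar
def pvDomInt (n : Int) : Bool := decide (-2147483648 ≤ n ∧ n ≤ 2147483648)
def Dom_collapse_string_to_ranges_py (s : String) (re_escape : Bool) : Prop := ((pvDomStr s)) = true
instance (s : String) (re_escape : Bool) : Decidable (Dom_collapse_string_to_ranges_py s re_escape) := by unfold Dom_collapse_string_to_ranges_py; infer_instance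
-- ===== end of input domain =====

-- B replaces A's sequential grouping of consecutive characters (itertools.groupby over a
-- stateful key, with count and a deque) by set-membership boundary detection: a char starts
-- a range iff its predecessor codepoint is absent from the set and ends one iff its successor
-- is absent; the sorted boundary lists are zipped (objective: alternative; same cost).

-- ===== PORT A =====
-- escape_re_range_char (the not-re_escape case is the identity, as in A)
def pvEscA (re_escape : Bool) (c : Char) : List Char :=
  if re_escape && (c = '\\' || c = '^' || c = '-' || c = ']' || c = '[') then ['\\', c] else [c]

-- the stateful key function is_consecutive, applied in order to each element of s
-- (state: prev = ord of previous char, value = current group key; the itertools.count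
-- counter is realised as value + 1)
def pvKeyedA (prev value : Int) : List Char → List (Int × Char)
  | [] => []
  | c :: rest =>
    let v := if ((c.toNat : Int) - prev > 1) then value + 1 else value
    (v, c) :: pvKeyedA (c.toNat : Int) v rest

-- itertools.groupby: each group contributes (first, last) (the deque(maxlen=1) keeps only the last)
def pvGroupsA (k : Int) (first last : Char) : List (Int × Char) → List (Char × Char)
  | [] => [(first, last)]
  | (k', c) :: rest =>
    if k' = k then pvGroupsA k first c rest else (first, last) :: pvGroupsA k' c c rest

def pvGroupbyA (ks : List (Int × Char)) : List (Char × Char) :=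
  match ks with
  | [] => []
  | (k, c) :: rest => pvGroupsA k c c rest

-- the body of A's for-loop: what each group appends to ret
def pvRenderA (re_escape : Bool) (p : Char × Char) : List Char :=
  if p.1 = p.2 then pvEscA re_escape p.1
  else pvEscA re_escape p.1 ++ (if p.2.toNat = p.1.toNat + 1 then [] else ['-']) ++ pvEscA re_escape p.2

def collapse_string_to_ranges_py (s : String) (re_escape : Bool) : String :=
  let s' := PySem.List.sorted (PySem.Set.ofList s.toList) (fun x => x) false
  if s'.length > 3 then
    String.ofList ((pvGroupbyA (pvKeyedA 0 (-1) s')).map (pvRenderA re_escape)).flatten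
  else
    String.ofList (s'.map (pvEscA re_escape)).flatten

-- ===== PORT B =====
-- B's esc: membership in the literal list of regex specials
def pvEscB (re_escape : Bool) (c : Char) : List Char :=
  if re_escape && ['\\', '^', '-', ']', '['].contains c then ['\\', c] else [c]

def pvRenderB (re_escape : Bool) (a b : Char) : List Char :=
  if a = b then pvEscB re_escape a
  else pvEscB re_escape a ++ (if b.toNat = a.toNat + 1 then [] else ['-']) ++ pvEscB re_escape b

-- starts = sorted chars whose predecessor code is absent, ends = those whose successor is absent
def collapse_string_to_ranges_py_alt (s : String) (re_escape : Bool) : String :=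
  let u : PySem.Set Char := PySem.Set.ofList s.toList
  if u.length ≤ 3 then
    String.ofList ((PySem.List.sorted u (fun x => x) false).flatMap (pvEscB re_escape))
  else
    let starts := PySem.List.sorted
      (u.filter (fun c => !(PySem.Set.contains u (Char.ofNat (c.toNat - 1))))) (fun x => x) false
    let ends := PySem.List.sorted
      (u.filter (fun c => !(PySem.Set.contains u (Char.ofNat (c.toNat + 1))))) (fun x => x) false
    String.ofList ((starts.zip ends).map (fun p => pvRenderB re_escape p.1 p.2)).flatten

-- ===== PRECONDITION & SPEC =====
def Spec_collapse_string_to_ranges_py (s : String) (re_escape : Bool) (out : String) : Prop := out = collapse_string_to_ranges_py_alt s re_escape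
instance (s : String) (re_escape : Bool) (out : String) : Decidable (Spec_collapse_string_to_ranges_py s re_escape out) := by unfold Spec_collapse_string_to_ranges_py; infer_instance

-- ===== CLAIM (what is proved, stated in full; the proofs are below) =====
def Claim_equal_collapse_string_to_ranges_py : Prop := ∀ (s : String) (re_escape : Bool), Dom_collapse_string_to_ranges_py s re_escape → Spec_collapse_string_to_ranges_py s re_escape (collapse_string_to_ranges_py s re_escape)

-- ===== LEMMAS AND PROOFS =====

-- boundary scans of a sorted run (proof-side views of the two filters)
def pvStartsScan (prev : Char) : List Char → List Char
  | [] => []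
  | c :: rest => (if c.toNat = prev.toNat + 1 then [] else [c]) ++ pvStartsScan c rest
def pvEndsScan (prev : Char) : List Char → List Char
  | [] => [prev]
  | c :: rest => (if c.toNat = prev.toNat + 1 then [] else [prev]) ++ pvEndsScan c rest

theorem escB_eq_escA (re : Bool) (c : Char) : pvEscB re c = pvEscA re c := by
  unfold pvEscA pvEscB
  have : (['\\', '^', '-', ']', '['].contains c) = (c = '\\' || c = '^' || c = '-' || c = ']' || c = '[') := by
    simp only [List.contains_eq_mem, List.mem_cons, List.not_mem_nil, or_false]
    rw [Bool.decide_or, Bool.decide_or, Bool.decide_or, Bool.decide_or]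
    ac_rfl
  rw [this]

theorem renderB_eq_renderA (re : Bool) (p : Char × Char) :
    pvRenderB re p.1 p.2 = pvRenderA re p := by
  unfold pvRenderA pvRenderB
  simp [escB_eq_escA]

theorem char_eq_iff_toNat (a b : Char) : a = b ↔ a.toNat = b.toNat := by
  constructor
  · intro h; rw [h]
  · intro h; exact Char.ext (UInt32.toNat_inj.mp h)
theorem char_lt_iff_toNat (a b : Char) : a < b ↔ a.toNat < b.toNat := by
  simp [Char.lt_def, UInt32.lt_iff_toNat_lt]
theorem toNat_ofNat' (m : Nat) (h : m < 55296) : (Char.ofNat m).toNat = m := by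
  unfold Char.ofNat
  split
  · rfl
  · next hn => exact absurd (Or.inl h) hn

-- elements of a pairwise-< list are in a suffix or below all of it
theorem pv_suffix_cases (L suf : List Char) (hL : L.Pairwise (· < ·)) (hs : suf <:+ L) :
    ∀ d ∈ L, d ∈ suf ∨ ∀ y ∈ suf, d < y := by
  obtain ⟨pre, rfl⟩ := hs
  intro d hd
  rcases List.mem_append.mp hd with h | h
  · exact Or.inr fun y hy => (List.pairwise_append.mp hL).2.2 d h y hy
  · exact Or.inl h

-- 2. starts filter = scan
theorem pv_startsFilt (L : List Char) (hL : L.Pairwise (· < ·)) :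
    ∀ (rest : List Char) (prev : Char), (prev :: rest) <:+ L →
    rest.filter (fun a => !(decide (∃ d ∈ L, d.toNat + 1 = a.toNat))) = pvStartsScan prev rest := by
  intro rest
  induction rest with
  | nil => intro prev _; rfl
  | cons a r ih =>
    intro prev hs
    have hsub : (a :: r) <:+ L := List.IsSuffix.trans ⟨[prev], rfl⟩ hs
    have hpw : (prev :: a :: r).Pairwise (· < ·) := hL.sublist hs.sublist
    have hcond : (∃ d ∈ L, d.toNat + 1 = a.toNat) ↔ a.toNat = prev.toNat + 1 := by
      constructor
      · rintro ⟨d, hd, heq⟩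
        rcases pv_suffix_cases L (prev :: a :: r) hL hs d hd with hmem | hbelow
        · simp only [List.mem_cons] at hmem
          rcases hmem with rfl | rfl | hmem
          · omega
          · omega
          · have : a < d := (List.pairwise_cons.mp (List.pairwise_cons.mp hpw).2).1 d hmem
            rw [char_lt_iff_toNat] at this; omega
        · have h1 : d < prev := hbelow prev (by simp)
          have h2 : prev < a := (List.pairwise_cons.mp hpw).1 a (by simp)
          rw [char_lt_iff_toNat] at h1 h2; omega
      · intro h
        exact ⟨prev, hs.subset (by simp), h.symm⟩
    rw [List.filter_cons]
    by_cases h : a.toNat = prev.toNat + 1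
    · have hP := hcond.mpr h
      simp only [pvStartsScan, if_pos h, List.nil_append]
      rw [if_neg (by simpa using hP)]
      exact ih a hsub
    · have hnP : ¬ (∃ d ∈ L, d.toNat + 1 = a.toNat) := fun hP => h (hcond.mp hP)
      simp only [pvStartsScan, if_neg h, List.cons_append, List.nil_append]
      rw [if_pos (by simpa using hnP)]
      rw [ih a hsub]

-- 3. ends filter = scan
theorem pv_endsFilt (L : List Char) (hL : L.Pairwise (· < ·)) :
    ∀ (rest : List Char) (prev : Char), (prev :: rest) <:+ L →
    (prev :: rest).filter (fun a => !(decide (∃ d ∈ L, d.toNat = a.toNat + 1))) = pvEndsScan prev rest := by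
  intro rest
  induction rest with
  | nil =>
    intro prev hs
    have hcond : ¬ (∃ d ∈ L, d.toNat = prev.toNat + 1) := by
      rintro ⟨d, hd, heq⟩
      rcases pv_suffix_cases L [prev] hL hs d hd with hmem | hbelow
      · simp only [List.mem_cons, List.not_mem_nil, or_false] at hmem
        subst hmem; omega
      · have := hbelow prev (by simp); rw [char_lt_iff_toNat] at this; omega
    rw [List.filter_cons]
    rw [if_pos (by simp [hcond])]
    rfl
  | cons a r ih =>
    intro prev hs
    have hsub : (a :: r) <:+ L := List.IsSuffix.trans ⟨[prev], rfl⟩ hs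
    have hpw : (prev :: a :: r).Pairwise (· < ·) := hL.sublist hs.sublist
    have hcond : (∃ d ∈ L, d.toNat = prev.toNat + 1) ↔ a.toNat = prev.toNat + 1 := by
      constructor
      · rintro ⟨d, hd, heq⟩
        rcases pv_suffix_cases L (prev :: a :: r) hL hs d hd with hmem | hbelow
        · simp only [List.mem_cons] at hmem
          rcases hmem with rfl | rfl | hmem
          · omega
          · omega
          · have h1 : a < d := (List.pairwise_cons.mp (List.pairwise_cons.mp hpw).2).1 d hmem
            have h2 : prev < a := (List.pairwise_cons.mp hpw).1 a (by simp)
            rw [char_lt_iff_toNat] at h1 h2; omega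
        · have := hbelow prev (by simp); rw [char_lt_iff_toNat] at this; omega
      · intro h
        exact ⟨a, hsub.subset (by simp), h⟩
    rw [List.filter_cons]
    by_cases h : a.toNat = prev.toNat + 1
    · have hP := hcond.mpr h
      simp only [pvEndsScan, if_pos h, List.nil_append]
      rw [if_neg (by simpa using hP)]
      exact ih a hsub
    · have hnP : ¬ (∃ d ∈ L, d.toNat = prev.toNat + 1) := fun hP => h (hcond.mp hP)
      simp only [pvEndsScan, if_neg h, List.cons_append, List.nil_append]
      rw [if_pos (by simpa using hnP)]
      rw [ih a hsub]

-- 4. the minimum of the list is always a range start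
theorem pv_head_no_pred (c : Char) (rest : List Char) (hpw : (c :: rest).Pairwise (· < ·)) :
    ¬ (∃ d ∈ c :: rest, d.toNat + 1 = c.toNat) := by
  rintro ⟨d, hd, heq⟩
  simp only [List.mem_cons] at hd
  rcases hd with rfl | hd
  · omega
  · have : c < d := (List.pairwise_cons.mp hpw).1 d hd
    rw [char_lt_iff_toNat] at this; omega

-- 5. A's grouping equals zip of the boundary scans
theorem pv_runs_zip (rest : List Char) : ∀ (first prev : Char) (value : Int),
    (prev :: rest).Pairwise (· < ·) →
    pvGroupsA value first prev (pvKeyedA (prev.toNat : Int) value rest)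
      = (first :: pvStartsScan prev rest).zip (pvEndsScan prev rest) := by
  induction rest with
  | nil => intro first prev value _; rfl
  | cons c r ih =>
    intro first prev value hpw
    have hpw' : (c :: r).Pairwise (· < ·) := (List.pairwise_cons.mp hpw).2
    have hlt : prev.toNat < c.toNat := by
      have := (List.pairwise_cons.mp hpw).1 c (by simp)
      rwa [char_lt_iff_toNat] at this
    by_cases h : c.toNat = prev.toNat + 1
    · have hint : ¬ ((c.toNat : Int) - (prev.toNat : Int) > 1) := by omega
      simp only [pvKeyedA, if_neg hint, pvGroupsA, if_pos rfl]
      rw [ih first c value hpw']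
      simp [pvStartsScan, pvEndsScan, if_pos h]
    · have hint : ((c.toNat : Int) - (prev.toNat : Int) > 1) := by omega
      simp only [pvKeyedA, if_pos hint, pvGroupsA]
      rw [if_neg (by omega : ¬ value + 1 = value)]
      rw [ih c c (value + 1) hpw']
      simp [pvStartsScan, pvEndsScan, if_neg h, List.zip]

-- 6. sorted-filter = filter-sorted (names the boundary lists as filters of the sorted list)
theorem pv_sorted_filter (u l : List Char) (P : Char → Bool)
    (hperm : l.Perm u) (hpl : l.Pairwise (· < ·)) :
    PySem.List.sorted (u.filter P) (fun x => x) false = l.filter P :=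
  PySem.List.sorted_eq_of_perm_of_pairwise_lt _ _ _ (hperm.filter P) (hpl.filter P)

-- 7. membership bridges: chr(ord(c)∓1) in set ↔ an element with that code exists
theorem pv_pred_bridge (u l : List Char) (c : Char)
    (hmem : ∀ x : Char, x ∈ u ↔ x ∈ l) (h9 : 9 ≤ c.toNat) (h126 : c.toNat ≤ 126) :
    (!(PySem.Set.contains u (Char.ofNat (c.toNat - 1))))
      = (!(decide (∃ d ∈ l, d.toNat + 1 = c.toNat))) := by
  have hv : (Char.ofNat (c.toNat - 1)).toNat = c.toNat - 1 := toNat_ofNat' _ (by omega)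
  have : (Char.ofNat (c.toNat - 1) ∈ u) ↔ (∃ d ∈ l, d.toNat + 1 = c.toNat) := by
    rw [hmem]
    constructor
    · intro h; exact ⟨_, h, by omega⟩
    · rintro ⟨d, hd, heq⟩
      have : d = Char.ofNat (c.toNat - 1) := by
        rw [char_eq_iff_toNat, hv]; omega
      rwa [this] at hd
  simp [PySem.Set.contains, this]

theorem pv_succ_bridge (u l : List Char) (c : Char)
    (hmem : ∀ x : Char, x ∈ u ↔ x ∈ l) (h126 : c.toNat ≤ 126) :
    (!(PySem.Set.contains u (Char.ofNat (c.toNat + 1))))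
      = (!(decide (∃ d ∈ l, d.toNat = c.toNat + 1))) := by
  have hv : (Char.ofNat (c.toNat + 1)).toNat = c.toNat + 1 := toNat_ofNat' _ (by omega)
  have : (Char.ofNat (c.toNat + 1) ∈ u) ↔ (∃ d ∈ l, d.toNat = c.toNat + 1) := by
    rw [hmem]
    constructor
    · intro h; exact ⟨_, h, by omega⟩
    · rintro ⟨d, hd, heq⟩
      have : d = Char.ofNat (c.toNat + 1) := by
        rw [char_eq_iff_toNat, hv]; omega
      rwa [this] at hd
  simp [PySem.Set.contains, this]

theorem pv_final : ∀ (s : String) (re_escape : Bool), Dom_collapse_string_to_ranges_py s re_escape →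
    collapse_string_to_ranges_py s re_escape = collapse_string_to_ranges_py_alt s re_escape := by
  intro s re hdom0
  have hdom : s.toList.all pvDomChar = true := hdom0
  unfold collapse_string_to_ranges_py collapse_string_to_ranges_py_alt
  simp only []
  set u : PySem.Set Char := PySem.Set.ofList s.toList with hu
  set l := PySem.List.sorted u (fun x => x) false with hl
  have hpl : l.Pairwise (· < ·) := PySem.List.sorted_ofList_pairwise_lt s.toList
  have hperm : l.Perm u := PySem.List.sorted_perm u (fun x => x) false
  have hmem : ∀ x : Char, x ∈ u ↔ x ∈ l := fun x => (hperm.mem_iff).symm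
  have hlen : l.length = u.length := PySem.List.length_sorted u (fun x => x) false
  have hdoml : ∀ c ∈ l, 9 ≤ c.toNat ∧ c.toNat ≤ 126 := by
    intro c hc
    have hcs : c ∈ s.toList := (PySem.Set.mem_ofList _ _).mp (hperm.mem_iff.mp hc)
    have := List.all_eq_true.mp hdom c hcs
    simp only [pvDomChar, Bool.or_eq_true, Bool.and_eq_true, decide_eq_true_eq, beq_iff_eq] at this
    omega
  have hst : PySem.List.sorted
      (u.filter (fun c => !(PySem.Set.contains u (Char.ofNat (c.toNat - 1))))) (fun x => x) false
      = l.filter (fun a => !(decide (∃ d ∈ l, d.toNat + 1 = a.toNat))) := by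
    rw [pv_sorted_filter u l _ hperm hpl]
    exact List.filter_congr fun c hc =>
      pv_pred_bridge u l c hmem (hdoml c hc).1 (hdoml c hc).2
  have hen : PySem.List.sorted
      (u.filter (fun c => !(PySem.Set.contains u (Char.ofNat (c.toNat + 1))))) (fun x => x) false
      = l.filter (fun a => !(decide (∃ d ∈ l, d.toNat = a.toNat + 1))) := by
    rw [pv_sorted_filter u l _ hperm hpl]
    exact List.filter_congr fun c hc => pv_succ_bridge u l c hmem (hdoml c hc).2
  by_cases h3 : l.length > 3
  · rw [if_pos h3, if_neg (by omega)]
    rw [hst, hen]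
    obtain ⟨c, rest, hcr⟩ : ∃ c rest, l = c :: rest := by
      cases hcl : l with
      | nil => rw [hcl] at h3; simp at h3
      | cons a b => exact ⟨a, b, rfl⟩
    rw [hcr] at hpl
    rw [hcr]
    have hstarts : (c :: rest).filter (fun a => !(decide (∃ d ∈ c :: rest, d.toNat + 1 = a.toNat)))
        = c :: pvStartsScan c rest := by
      rw [List.filter_cons, if_pos (by simpa using pv_head_no_pred c rest hpl)]
      rw [pv_startsFilt (c :: rest) hpl rest c (List.suffix_refl _)]
    have hends : (c :: rest).filter (fun a => !(decide (∃ d ∈ c :: rest, d.toNat = a.toNat + 1)))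
        = pvEndsScan c rest :=
      pv_endsFilt (c :: rest) hpl rest c (List.suffix_refl _)
    rw [hstarts, hends]
    have hgroup : pvGroupbyA (pvKeyedA 0 (-1) (c :: rest))
        = (c :: pvStartsScan c rest).zip (pvEndsScan c rest) := by
      simp only [pvKeyedA, pvGroupbyA]
      exact pv_runs_zip rest c c _ hpl
    rw [hgroup]
    exact congrArg (fun t => String.ofList (List.flatten t))
      (List.map_congr_left fun p _ => (renderB_eq_renderA re p).symm)
  · rw [if_neg h3, if_pos (by omega)]
    have : l.flatMap (pvEscB re) = (l.map (pvEscA re)).flatten := by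
      rw [List.flatMap_def]
      exact congrArg List.flatten (List.map_congr_left fun c _ => escB_eq_escA re c)
    rw [this]


-- ===== VERDICT (by name: the statement is the Claim_ definition above) =====
theorem collapse_string_to_ranges_py_spec : Claim_equal_collapse_string_to_ranges_py := by
  intro s re_escape hdom
  exact pv_final s re_escape hdom
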